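-- pv_equiv track=rewrite | github.com/dk250/algorithm_learnning | erfenpaixu.py | findIndexWith
-- ===== SOURCE A (Python) =====
-- def findIndexWith(index, array):
--     temp = array[index]
--     result = index
--     for i in range(index, len(array)):
--         if temp != array[i]:
--             result = i
--
--     if result == index:
--         result = len(array) - 1
--
--     return result
-- ===== SOURCE B (Python) =====
-- def findIndexWith(index, array):
--     temp = array[index]
--     for i in range(len(array) - 1, index, -1):
--         if array[i] != temp:
--             return i
--     return len(array) - 1
-- ===== Notes on version B (the rewrite author's own statement) =====
-- stated objective: idiomatic
-- what changed: Replaces A's full forward pass that accumulates the last differing index (plus a post-hoc fixup when none was found) by a reverse scan from the end that returns the first differing index immediately, falling through to len-1.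
import Mathlib
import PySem

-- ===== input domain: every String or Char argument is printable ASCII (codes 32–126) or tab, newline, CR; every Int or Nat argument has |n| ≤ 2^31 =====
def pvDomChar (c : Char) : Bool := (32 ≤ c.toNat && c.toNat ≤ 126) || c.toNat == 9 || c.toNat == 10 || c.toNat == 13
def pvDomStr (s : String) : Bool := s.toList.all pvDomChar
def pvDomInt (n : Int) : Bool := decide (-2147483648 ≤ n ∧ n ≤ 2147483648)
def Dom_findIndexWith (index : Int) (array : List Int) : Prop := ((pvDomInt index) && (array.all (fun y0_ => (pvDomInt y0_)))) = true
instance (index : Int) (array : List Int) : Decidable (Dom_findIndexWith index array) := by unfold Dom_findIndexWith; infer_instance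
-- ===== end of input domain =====

-- B replaces A's full forward pass (accumulating the last differing index, with a fixup to
-- len-1 when none is found) by an early-exit reverse scan from the end; return value only.

-- ===== PORT A =====
def findIndexWith (index : Int) (array : List Int) : Int :=
  match PySem.List.pyGet? array index with
  | none => 0   -- unreachable under Pre_ (IndexError in Python)
  | some temp =>
    let result := (PySem.List.pyRange index (array.length : Int) 1).foldl
      (fun result i => if temp ≠ PySem.List.pyGetD array i 0 then i else result) index
    if result = index then (array.length : Int) - 1 else result

-- ===== PORT B =====
def findIndexWith_alt (index : Int) (array : List Int) : Int :=
  match PySem.List.pyGet? array index with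
  | none => 0   -- unreachable under Pre_ (IndexError in Python)
  | some temp =>
    match (PySem.List.pyRange ((array.length : Int) - 1) index (-1)).find?
        (fun i => decide (PySem.List.pyGetD array i 0 ≠ temp)) with
    | some i => i
    | none => (array.length : Int) - 1

-- ===== PRECONDITION & SPEC =====
-- Pre_: the index is a valid (possibly negative) Python index; outside it A raises IndexError.
def Pre_findIndexWith (index : Int) (array : List Int) : Prop :=
  PySem.Raise.InRange array.length index
instance (index : Int) (array : List Int) : Decidable (Pre_findIndexWith index array) := by
  unfold Pre_findIndexWith; infer_instance

def pvWitness_findIndexWith : Int × List Int := (0, [1, 2, 3])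

def Spec_findIndexWith (index : Int) (array : List Int) (out : Int) : Prop := out = findIndexWith_alt index array
instance (index : Int) (array : List Int) (out : Int) : Decidable (Spec_findIndexWith index array out) := by unfold Spec_findIndexWith; infer_instance

-- ===== CLAIM (what is proved, stated in full; the proofs are below) =====
def Claim_equal_findIndexWith : Prop := ∀ (index : Int) (array : List Int), Dom_findIndexWith index array → Pre_findIndexWith index array → Spec_findIndexWith index array (findIndexWith index array)

-- ===== LEMMAS AND PROOFS =====

-- A's accumulator keeps the LAST index satisfying p; that is the first match of the reversed list.
theorem foldl_last_match (p : Int → Bool) (l : List Int) (a : Int) :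
    l.foldl (fun r i => if p i then i else r) a = (l.reverse.find? p).getD a := by
  induction l generalizing a with
  | nil => rfl
  | cons x xs ih =>
    simp only [List.foldl_cons, List.reverse_cons, List.find?_append, ih]
    cases hxs : xs.reverse.find? p with
    | some y => simp
    | none => cases hx : p x <;> simp [hx]

theorem findIndexWith_spec' (index : Int) (array : List Int)
    (h : Pre_findIndexWith index array) :
    findIndexWith index array = findIndexWith_alt index array := by
  unfold Pre_findIndexWith at h
  have hsome : (PySem.List.pyGet? array index).isSome := by
    rcases hx : PySem.List.pyGet? array index with _ | x
    · exact absurd ((PySem.List.pyGet?_eq_none_iff array index).mp hx) (not_not_intro h)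
    · exact rfl
  rcases Option.isSome_iff_exists.mp hsome with ⟨temp, htemp⟩
  have hlen : index < (array.length : Int) := h.2
  have hrange : PySem.List.pyRange index (array.length : Int) 1
      = index :: PySem.List.pyRange (index + 1) (array.length : Int) 1 :=
    PySem.List.pyRange_one_cons hlen
  have hrev : PySem.List.pyRange ((array.length : Int) - 1) index (-1)
      = (PySem.List.pyRange (index + 1) (array.length : Int) 1).reverse := by
    rw [PySem.List.pyRange_neg_one_eq_reverse]
    norm_num
  -- the two loop predicates are the same Bool-valued function
  have hpred : (fun i => decide (temp ≠ PySem.List.pyGetD array i 0))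
      = (fun i => decide (PySem.List.pyGetD array i 0 ≠ temp)) := by
    funext i; exact decide_eq_decide.mpr ne_comm
  unfold findIndexWith findIndexWith_alt
  rw [htemp]
  simp only [hrange, List.foldl_cons]
  have hstep : (if temp ≠ PySem.List.pyGetD array index 0 then index else index) = index := by
    split <;> rfl
  rw [hstep]
  have hfold := foldl_last_match (fun i => decide (temp ≠ PySem.List.pyGetD array i 0))
      (PySem.List.pyRange (index + 1) (array.length : Int) 1) index
  simp only [decide_not] at hfold ⊢
  rw [show (fun (r i : Int) => if temp ≠ PySem.List.pyGetD array i 0 then i else r)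
        = (fun (r i : Int) => if (!decide (temp = PySem.List.pyGetD array i 0)) = true then i else r) by
      funext r i; simp, hfold, hrev]
  rw [show (fun i => !decide (PySem.List.pyGetD array i 0 = temp))
        = (fun i => !decide (temp = PySem.List.pyGetD array i 0)) by
      funext i; simp [eq_comm]]
  cases hF : (PySem.List.pyRange (index + 1) (array.length : Int) 1).reverse.find?
      (fun i => !decide (temp = PySem.List.pyGetD array i 0)) with
  | none => simp
  | some i =>
    have hi : i ∈ PySem.List.pyRange (index + 1) (array.length : Int) 1 :=
      List.mem_reverse.mp (List.mem_of_find?_eq_some hF)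
    have : index + 1 ≤ i := (PySem.List.mem_pyRange_one.mp hi).1
    simp only [Option.getD_some]
    rw [if_neg (by omega)]

-- ===== VERDICT (by name: the statement is the Claim_ definition above) =====
theorem findIndexWith_spec : Claim_equal_findIndexWith := by
  intro index array _ hpre
  unfold Spec_findIndexWith
  exact findIndexWith_spec' index array hpre
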